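-- pv_equiv track=rewrite | github.com/halasheta/gp-sentence-taggers | hmm.py | sep_sentences
-- ===== SOURCE A (Python) =====
-- def sep_sentences(words, sep):
--     s = []
--     curr = []
--     for w in words:
--         if w[0] != sep:
--             curr.append(w)
--         else:
--             curr.append(w)
--             s.append(curr)
--             curr = []
--     return s
-- ===== SOURCE B (Python) =====
-- def sep_sentences(words, sep):
--     # Repeatedly find the first separator boundary and split the list there.
--     out = []
--     rest = list(words)
--     while True:
--         i = next((j for j, w in enumerate(rest) if w[0] == sep), None)
--         if i is None:
--             return out
--         out.append(rest[:i + 1])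
--         rest = rest[i + 1:]
-- ===== Notes on version B (the rewrite author's own statement) =====
-- stated objective: alternative
-- what changed: A builds sentences word by word with a running current-sentence accumulator; B repeatedly finds the index of the next separator and splits the remaining list there with slices.
import Mathlib
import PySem

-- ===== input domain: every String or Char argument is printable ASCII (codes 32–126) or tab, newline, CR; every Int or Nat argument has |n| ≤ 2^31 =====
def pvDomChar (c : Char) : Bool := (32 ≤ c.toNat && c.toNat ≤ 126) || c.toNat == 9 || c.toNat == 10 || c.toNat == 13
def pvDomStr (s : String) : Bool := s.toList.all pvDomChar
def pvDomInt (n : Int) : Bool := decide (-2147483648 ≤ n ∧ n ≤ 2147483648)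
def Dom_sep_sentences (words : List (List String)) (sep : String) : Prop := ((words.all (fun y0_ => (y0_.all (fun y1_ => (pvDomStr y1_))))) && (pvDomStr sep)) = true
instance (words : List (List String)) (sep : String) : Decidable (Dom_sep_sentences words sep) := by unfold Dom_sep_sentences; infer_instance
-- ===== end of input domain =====

-- B replaces A's word-by-word accumulator loop with repeated find-first-separator-and-split; alternative decomposition, no speed claim.

-- ===== PORT A =====
-- the for loop of A, with state (s, curr); 'w[0]' is ported as 'w.headD ""', exact for the
-- nonempty inner lists admitted by Pre_ (Python raises IndexError on an empty w).
def sepLoopA (sep : String) (s : List (List (List String))) (curr : List (List String)) :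
    List (List String) → List (List (List String))
  | [] => s
  | w :: ws =>
    if w.headD "" ≠ sep then sepLoopA sep s (curr ++ [w]) ws
    else sepLoopA sep (s ++ [curr ++ [w]]) [] ws

def sep_sentences (words : List (List String)) (sep : String) : List (List (List String)) :=
  sepLoopA sep [] [] words

-- ===== PORT B =====
-- the while loop of B: find the first boundary index in the remaining list, split there;
-- 'next((j for j, w in enumerate(rest) if w[0] == sep), None)' is ported as findIdx?
-- ('w[0]' again as 'w.headD ""', exact on nonempty inner lists), and the slices
-- rest[:i+1] / rest[i+1:] as take/drop (exact for these nonnegative in-range indices).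
def sepLoopB (sep : String) (out : List (List (List String))) (rest : List (List String)) :
    List (List (List String)) :=
  match h : rest.findIdx? (fun w => w.headD "" == sep) with
  | none => out
  | some i => sepLoopB sep (out ++ [rest.take (i + 1)]) (rest.drop (i + 1))
termination_by rest.length
decreasing_by
  have hi : i < rest.length := (List.findIdx?_eq_some_iff_findIdx_eq.mp h).1
  simp [List.length_drop]; omega

def sep_sentences_alt (words : List (List String)) (sep : String) : List (List (List String)) :=
  sepLoopB sep [] words

-- ===== PRECONDITION & SPEC =====
-- Pre_ excludes inputs containing an empty inner list: there Python A (and B) raise IndexError on w[0].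
def Pre_sep_sentences (words : List (List String)) (sep : String) : Prop :=
  ∀ w ∈ words, w ≠ []

instance (words : List (List String)) (sep : String) : Decidable (Pre_sep_sentences words sep) := by
  unfold Pre_sep_sentences; infer_instance

def pvWitness_sep_sentences : List (List String) × String :=
  ([["hello"], ["world", "."], ["."], ["tail"]], ".")

def Spec_sep_sentences (words : List (List String)) (sep : String) (out : List (List (List String))) : Prop := out = sep_sentences_alt words sep
instance (words : List (List String)) (sep : String) (out : List (List (List String))) : Decidable (Spec_sep_sentences words sep out) := by unfold Spec_sep_sentences; infer_instance

-- ===== CLAIM (what is proved, stated in full; the proofs are below) =====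
def Claim_equal_sep_sentences : Prop := ∀ (words : List (List String)) (sep : String), Dom_sep_sentences words sep → Pre_sep_sentences words sep → Spec_sep_sentences words sep (sep_sentences words sep)

-- ===== LEMMAS AND PROOFS =====

theorem sepLoopA_acc (sep : String) (s : List (List (List String))) (curr : List (List String))
    (ws : List (List String)) : sepLoopA sep s curr ws = s ++ sepLoopA sep [] curr ws := by
  induction ws generalizing s curr with
  | nil => simp [sepLoopA]
  | cons w ws ih =>
    by_cases h : w.headD "" = sep
    · simp only [sepLoopA, h, ne_eq, not_true_eq_false, if_false]
      rw [ih (s ++ [curr ++ [w]]) [], ih ([] ++ [curr ++ [w]]) []]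
      simp
    · simp only [sepLoopA, h, ne_eq, not_false_eq_true, if_true]
      exact ih s (curr ++ [w])

theorem sepLoopB_acc (sep : String) (out : List (List (List String))) (rest : List (List String)) :
    sepLoopB sep out rest = out ++ sepLoopB sep [] rest := by
  induction hn : rest.length using Nat.strong_induction_on generalizing out rest with
  | _ n ih =>
    rw [sepLoopB, sepLoopB]
    cases h : rest.findIdx? (fun w => w.headD "" == sep) with
    | none => simp
    | some i =>
      have hi : i < rest.length := (List.findIdx?_eq_some_iff_findIdx_eq.mp h).1
      have hlen : (rest.drop (i + 1)).length < n := by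
        simp [List.length_drop]; omega
      dsimp only
      rw [ih _ hlen _ _ rfl, ih _ hlen ([] ++ [rest.take (i + 1)]) _ rfl]
      simp

-- A's loop with empty result-accumulator, characterised by the first separator index.
theorem sepLoopA_split (sep : String) (ws : List (List String)) (curr : List (List String)) :
    sepLoopA sep [] curr ws =
      match ws.findIdx? (fun w => w.headD "" == sep) with
      | none => []
      | some i => (curr ++ ws.take (i + 1)) :: sepLoopA sep [] [] (ws.drop (i + 1)) := by
  induction ws generalizing curr with
  | nil => simp [sepLoopA]
  | cons w ws ih =>
    by_cases h : w.headD "" = sep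
    · simp only [sepLoopA, h, ne_eq, not_true_eq_false, if_false, List.findIdx?_cons,
        beq_iff_eq]
      rw [sepLoopA_acc]
      simp
    · simp only [sepLoopA, h, ne_eq, not_false_eq_true, if_true, List.findIdx?_cons,
        beq_iff_eq]
      rw [ih (curr ++ [w])]
      cases hj : ws.findIdx? (fun w => w.headD "" == sep) with
      | none => simp
      | some j => simp [List.take_succ_cons, List.drop_succ_cons]

theorem sepLoopA_eq_B (sep : String) (ws : List (List String)) :
    sepLoopA sep [] [] ws = sepLoopB sep [] ws := by
  induction hn : ws.length using Nat.strong_induction_on generalizing ws with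
  | _ n ih =>
    rw [sepLoopA_split, sepLoopB]
    cases h : ws.findIdx? (fun w => w.headD "" == sep) with
    | none => rfl
    | some i =>
      have hi : i < ws.length := (List.findIdx?_eq_some_iff_findIdx_eq.mp h).1
      have hlen : (ws.drop (i + 1)).length < n := by
        simp [List.length_drop]; omega
      dsimp only
      rw [sepLoopB_acc, ih _ hlen _ rfl]
      simp

-- ===== VERDICT (by name: the statement is the Claim_ definition above) =====
theorem sep_sentences_spec : Claim_equal_sep_sentences := by
  intro words sep _ _
  unfold Spec_sep_sentences sep_sentences sep_sentences_alt
  exact sepLoopA_eq_B sep words
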